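-- pv_equiv track=rewrite | github.com/Lalaires/Flatland-Challenge | question3.py | compute_free_intervals
-- ===== SOURCE A (Python) =====
-- from typing import List, Tuple, Dict, Set, Optional
--
-- def compute_free_intervals(cell: Tuple[int,int], reservations: Dict[int, Set[Tuple[int,int]]],
--                         max_timestep: int) -> List[Tuple[int,int]]:
--     """Compute time intervals when a cell is free."""
--     occupied_times = {t for t, cells in reservations.items()
--                     if 0 <= t <= max_timestep and cell in cells}
--
--     intervals = []
--     t = 0
--     while t <= max_timestep:
--         if t in occupied_times:
--             t += 1
--             continue
--
--         start = t
--         while t <= max_timestep and t not in occupied_times: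
--             t += 1
--         intervals.append((start, t - 1))
--
--     return intervals
-- ===== SOURCE B (Python) =====
-- def compute_free_intervals(cell, reservations, max_timestep):
--     occ = sorted({t for t, cells in reservations.items()
--                   if 0 <= t <= max_timestep and cell in cells})
--     intervals = []
--     prev = 0
--     for t in occ:
--         if prev <= t - 1:
--             intervals.append((prev, t - 1))
--         prev = t + 1
--     if prev <= max_timestep:
--         intervals.append((prev, max_timestep))
--     return intervals
-- ===== Notes on version B (the rewrite author's own statement) =====
-- stated objective: alternative
-- what changed: Instead of scanning every timestep 0..max_timestep with nested while loops over an occupancy set, B sorts the occupied times and emits the gaps between consecutive occupied times and the boundaries in one pass over the sorted list.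
import Mathlib
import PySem

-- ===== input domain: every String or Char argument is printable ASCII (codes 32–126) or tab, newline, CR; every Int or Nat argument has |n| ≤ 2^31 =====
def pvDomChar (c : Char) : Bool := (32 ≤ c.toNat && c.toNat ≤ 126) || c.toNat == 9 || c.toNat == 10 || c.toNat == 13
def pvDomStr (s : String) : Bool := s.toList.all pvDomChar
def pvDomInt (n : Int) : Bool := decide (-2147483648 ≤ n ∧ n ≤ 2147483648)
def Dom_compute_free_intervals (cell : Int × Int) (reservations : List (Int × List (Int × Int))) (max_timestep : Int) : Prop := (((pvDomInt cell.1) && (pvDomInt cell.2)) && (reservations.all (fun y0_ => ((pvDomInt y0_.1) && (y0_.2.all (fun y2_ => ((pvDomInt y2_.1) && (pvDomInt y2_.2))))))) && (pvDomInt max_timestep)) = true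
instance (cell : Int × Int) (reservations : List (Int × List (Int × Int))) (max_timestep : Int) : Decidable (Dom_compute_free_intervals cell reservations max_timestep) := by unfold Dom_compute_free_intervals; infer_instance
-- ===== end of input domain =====

-- B replaces A's timestep-by-timestep scan of 0..max_timestep by sorting the occupied
-- times and emitting the gaps between them in one pass (objective: alternative algorithm).

-- ===== PORT A =====
-- shared by both ports: the set comprehension
-- {t for t, cells in reservations.items() if 0 <= t <= max_timestep and cell in cells}
def pvOccSet (cell : Int × Int) (reservations : List (Int × List (Int × Int))) (max_timestep : Int) : PySem.Set Int :=
  PySem.Set.ofList ((reservations.filter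
    (fun p => decide (0 ≤ p.1) && decide (p.1 ≤ max_timestep) && p.2.contains cell)).map Prod.fst)

-- inner 'while t <= max_timestep and t not in occupied_times: t += 1' (returns final t);
-- the fuel (max+1-t).toNat bounds the iteration count, the loop itself stops on the condition
def pvInnerA (occ : List Int) (max : Int) : Nat → Int → Int
  | 0, t => t
  | fuel + 1, t => if t ≤ max ∧ t ∉ occ then pvInnerA occ max fuel (t + 1) else t

-- outer 'while t <= max_timestep: …' appending one interval per free stretch
def pvOuterA (occ : List Int) (max : Int) : Nat → Int → List (Int × Int)
  | 0, _ => []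
  | fuel + 1, t =>
    if t ≤ max then
      if t ∈ occ then pvOuterA occ max fuel (t + 1)
      else
        let r := pvInnerA occ max (max + 1 - t).toNat t
        (t, r - 1) :: pvOuterA occ max fuel r
    else []

def compute_free_intervals (cell : Int × Int) (reservations : List (Int × List (Int × Int))) (max_timestep : Int) : List (Int × Int) :=
  pvOuterA (pvOccSet cell reservations max_timestep) max_timestep (max_timestep + 1).toNat 0

-- ===== PORT B =====
-- 'for t in occ: … ; prev = t + 1' then the trailing interval
def pvGaps (max : Int) : Int → List Int → List (Int × Int)
  | prev, [] => if prev ≤ max then [(prev, max)] else []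
  | prev, t :: rest =>
      (if prev ≤ t - 1 then [(prev, t - 1)] else []) ++ pvGaps max (t + 1) rest

def compute_free_intervals_alt (cell : Int × Int) (reservations : List (Int × List (Int × Int))) (max_timestep : Int) : List (Int × Int) :=
  pvGaps max_timestep 0
    (PySem.List.sorted (pvOccSet cell reservations max_timestep) (fun x => x) false)

-- ===== PRECONDITION & SPEC =====
def Spec_compute_free_intervals (cell : Int × Int) (reservations : List (Int × List (Int × Int))) (max_timestep : Int) (out : List (Int × Int)) : Prop := out = compute_free_intervals_alt cell reservations max_timestep
instance (cell : Int × Int) (reservations : List (Int × List (Int × Int))) (max_timestep : Int) (out : List (Int × Int)) : Decidable (Spec_compute_free_intervals cell reservations max_timestep out) := by unfold Spec_compute_free_intervals; infer_instance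

-- ===== CLAIM (what is proved, stated in full; the proofs are below) =====
def Claim_equal_compute_free_intervals : Prop := ∀ (cell : Int × Int) (reservations : List (Int × List (Int × Int))) (max_timestep : Int), Dom_compute_free_intervals cell reservations max_timestep → Spec_compute_free_intervals cell reservations max_timestep (compute_free_intervals cell reservations max_timestep)

-- ===== LEMMAS AND PROOFS =====

theorem pvInnerA_le_self (occ : List Int) (max : Int) :
    ∀ (fuel : Nat) (t : Int), t ≤ pvInnerA occ max fuel t := by
  intro fuel
  induction fuel with
  | zero => intro t; simp [pvInnerA]
  | succ fuel ih =>
    intro t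
    simp only [pvInnerA]
    split_ifs with h
    · have := ih (t + 1); omega
    · exact le_refl t

theorem pvInnerA_gt (occ : List Int) (max t : Int) (fuel : Nat)
    (hf : (max + 1 - t).toNat ≤ fuel) (h1 : t ≤ max) (h2 : t ∉ occ) :
    t < pvInnerA occ max fuel t := by
  cases fuel with
  | zero => omega
  | succ fuel =>
    simp only [pvInnerA, if_pos (And.intro h1 h2)]
    have := pvInnerA_le_self occ max fuel (t + 1)
    omega

-- full characterisation of the inner while loop (with sufficient fuel)
theorem pvInnerA_spec (occ : List Int) (max : Int) :
    ∀ (fuel : Nat) (t : Int), (max + 1 - t).toNat ≤ fuel → t ≤ max + 1 →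
    t ≤ pvInnerA occ max fuel t ∧ pvInnerA occ max fuel t ≤ max + 1 ∧
    (pvInnerA occ max fuel t ≤ max → pvInnerA occ max fuel t ∈ occ) ∧
    (∀ s, t ≤ s → s < pvInnerA occ max fuel t → s ∉ occ) := by
  intro fuel
  induction fuel with
  | zero =>
    intro t hf ht
    have : t = max + 1 := by omega
    subst this
    simp only [pvInnerA]
    refine ⟨le_refl _, le_refl _, by omega, by omega⟩
  | succ fuel ih =>
    intro t hf ht
    simp only [pvInnerA]
    by_cases h : t ≤ max ∧ t ∉ occ
    · rw [if_pos h]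
      obtain ⟨ih1, ih2, ih3, ih4⟩ := ih (t + 1) (by omega) (by omega)
      refine ⟨by omega, ih2, ih3, ?_⟩
      intro s hs1 hs2
      rcases eq_or_lt_of_le hs1 with rfl | h'
      · exact h.2
      · exact ih4 s (by omega) hs2
    · rw [if_neg h]
      refine ⟨le_refl t, ht, ?_, ?_⟩
      · intro hle
        rcases Decidable.not_and_iff_or_not.mp h with h' | h'
        · omega
        · exact not_not.mp h'
      · intro s hs1 hs2; omega

-- the outer loop emits nothing once t exceeds max, whatever fuel remains
theorem pvOuterA_stop (occ : List Int) (max t : Int) (fuel : Nat) (h : ¬ t ≤ max) :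
    pvOuterA occ max fuel t = [] := by
  cases fuel with
  | zero => rfl
  | succ fuel => simp only [pvOuterA, if_neg h]

-- main loop correspondence: A's scan from prev equals B's gap emission over the
-- sorted list L of occupied times in [prev, max]
theorem pvScan_eq_gaps (occ : List Int) (max : Int) :
    ∀ (fuel : Nat) (prev : Int) (L : List Int),
      (max + 1 - prev).toNat ≤ fuel →
      L.Pairwise (· < ·) →
      (∀ x, x ∈ L ↔ x ∈ occ ∧ prev ≤ x ∧ x ≤ max) →
      pvOuterA occ max fuel prev = pvGaps max prev L := by
  intro fuel
  induction fuel using Nat.strong_induction_on with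
  | _ fuel ih =>
  intro prev L hfuel hpw hL
  by_cases hpm : prev ≤ max
  · cases fuel with
    | zero => omega
    | succ f =>
      by_cases hocc : prev ∈ occ
      · -- occupied step: both sides advance to prev + 1
        have hmemL : prev ∈ L := (hL prev).mpr ⟨hocc, le_refl _, hpm⟩
        cases L with
        | nil => simp at hmemL
        | cons h t =>
          have hh : h = prev := by
            rcases List.mem_cons.mp hmemL with rfl | hmt
            · rfl
            · have hlt := (List.pairwise_cons.mp hpw).1 prev hmt
              have := (hL h).mp List.mem_cons_self
              omega
          subst hh
          simp only [pvOuterA, if_pos hpm, if_pos hocc]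
          rw [pvGaps, if_neg (by omega), List.nil_append]
          apply ih f (by omega)
          · omega
          · exact (List.pairwise_cons.mp hpw).2
          · intro x
            constructor
            · intro hx
              have hmem := (hL x).mp (List.mem_cons_of_mem _ hx)
              have hlt := (List.pairwise_cons.mp hpw).1 x hx
              exact ⟨hmem.1, by omega, hmem.2.2⟩
            · intro ⟨h1, h2, h3⟩
              have := (hL x).mpr ⟨h1, by omega, h3⟩
              rcases List.mem_cons.mp this with rfl | hxt
              · omega
              · exact hxt
      · -- free stretch: A's inner loop runs to r, B reads the head of L
        obtain ⟨hr1, hr2, hr3, hr4⟩ :=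
          pvInnerA_spec occ max (max + 1 - prev).toNat prev (le_refl _) (by omega)
        have hgt := pvInnerA_gt occ max prev (max + 1 - prev).toNat (le_refl _) hpm hocc
        simp only [pvOuterA, if_pos hpm, if_neg hocc]
        cases L with
        | nil =>
          -- no occupied time in [prev, max]: the inner loop reaches max + 1
          have hrm : pvInnerA occ max (max + 1 - prev).toNat prev = max + 1 := by
            by_contra hne
            have hle : pvInnerA occ max (max + 1 - prev).toNat prev ≤ max := by omega
            have hin := hr3 hle
            have := (hL (pvInnerA occ max (max + 1 - prev).toNat prev)).mpr
              ⟨hin, by omega, hle⟩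
            simp at this
          rw [hrm, pvOuterA_stop occ max (max + 1) f (by omega), pvGaps, if_pos hpm]
          norm_num
        | cons h t =>
          obtain ⟨hh1, hh2, hh3⟩ := (hL h).mp List.mem_cons_self
          have hrh : pvInnerA occ max (max + 1 - prev).toNat prev = h := by
            have hge : h ≥ pvInnerA occ max (max + 1 - prev).toNat prev := by
              by_contra hc
              exact hr4 h hh2 (by omega) hh1
            have hle : pvInnerA occ max (max + 1 - prev).toNat prev ≤ max := by omega
            have hin := hr3 hle
            have hmem := (hL (pvInnerA occ max (max + 1 - prev).toNat prev)).mpr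
              ⟨hin, by omega, hle⟩
            rcases List.mem_cons.mp hmem with heq | hmt
            · omega
            · have := (List.pairwise_cons.mp hpw).1 _ hmt
              omega
          rw [hrh, pvGaps, if_pos (by omega)]
          cases f with
          | zero => omega
          | succ f' =>
            simp only [pvOuterA, if_pos hh3, if_pos hh1]
            simp only [List.singleton_append, List.cons.injEq]
            refine ⟨trivial, ?_⟩
            apply ih f' (by omega)
            · omega
            · exact (List.pairwise_cons.mp hpw).2
            · intro x
              constructor
              · intro hx
                have hmem := (hL x).mp (List.mem_cons_of_mem _ hx)
                have hlt := (List.pairwise_cons.mp hpw).1 x hx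
                exact ⟨hmem.1, by omega, hmem.2.2⟩
              · intro ⟨h1, h2, h3⟩
                have := (hL x).mpr ⟨h1, by omega, h3⟩
                rcases List.mem_cons.mp this with rfl | hxt
                · omega
                · exact hxt
  · -- prev > max: both empty
    have hnil : L = [] := by
      cases L with
      | nil => rfl
      | cons h t =>
        have := (hL h).mp List.mem_cons_self
        omega
    subst hnil
    rw [pvOuterA_stop occ max prev fuel hpm, pvGaps, if_neg hpm]

-- every element of the occupied set lies in [0, max]
theorem pvOccSet_bounds (cell : Int × Int) (reservations : List (Int × List (Int × Int))) (max_timestep : Int) :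
    ∀ x ∈ pvOccSet cell reservations max_timestep, 0 ≤ x ∧ x ≤ max_timestep := by
  intro x hx
  unfold pvOccSet at hx
  rw [PySem.Set.mem_ofList] at hx
  obtain ⟨p, hp, rfl⟩ := List.mem_map.mp hx
  have := List.mem_filter.mp hp
  simp only [Bool.and_eq_true, decide_eq_true_eq] at this
  exact ⟨this.2.1.1, this.2.1.2⟩

-- ===== VERDICT (by name: the statement is the Claim_ definition above) =====
theorem compute_free_intervals_spec : Claim_equal_compute_free_intervals := by
  intro cell reservations max_timestep _
  unfold Spec_compute_free_intervals compute_free_intervals compute_free_intervals_alt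
  set occ := pvOccSet cell reservations max_timestep with hocc
  apply pvScan_eq_gaps occ max_timestep (max_timestep + 1).toNat 0
  · omega
  · rw [hocc]; unfold pvOccSet
    exact PySem.List.sorted_ofList_pairwise_lt _
  · intro x
    rw [PySem.List.mem_sorted]
    constructor
    · intro hx
      have := pvOccSet_bounds cell reservations max_timestep x (hocc ▸ hx)
      exact ⟨hx, this.1, this.2⟩
    · exact fun h => h.1
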